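-- pv_equiv track=rewrite | github.com/SimonKinds/advent | day-3/spiral_memory.py | build_layer
-- ===== SOURCE A (Python) =====
-- def build_layer(grid_multiplier, start_value, start_x, start_y):
--     layer = {start_value: (start_x, start_y)}
--
--     if grid_multiplier == 1:
--         return layer
--
--     value = start_value
--     x = start_x
--     y = start_y
--     # up
--     for _ in range(grid_multiplier - 2):
--         value += 1
--         y -= 1
--         layer[value] = (x, y)
--
--     # left
--     for _ in range(grid_multiplier - 1):
--         value += 1
--         x -= 1
--         layer[value] = (x, y)
--
--     # down
--     for _ in range(grid_multiplier - 1):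
--         value += 1
--         y += 1
--         layer[value] = (x, y)
--
--     # right
--     for _ in range(grid_multiplier - 1):
--         value += 1
--         x += 1
--         layer[value] = (x, y)
--
--     return layer
-- ===== SOURCE B (Python) =====
-- def build_layer(grid_multiplier, start_value, start_x, start_y):
--     # closed-form: the i-th cell of the layer is computed directly from i,
--     # no running position state and no per-direction loops
--     u = max(grid_multiplier - 2, 0)   # length of the "up" segment
--     m = max(grid_multiplier - 1, 0)   # length of each remaining segment
--
--     def pos(i):
--         if i <= u:
--             return (start_x, start_y - i)
--         if i <= u + m:
--             return (start_x - (i - u), start_y - u)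
--         if i <= u + 2 * m:
--             return (start_x - m, start_y - u + (i - u - m))
--         return (start_x - m + (i - u - 2 * m), start_y - u + m)
--
--     return {start_value + i: pos(i) for i in range(u + 3 * m + 1)}
-- ===== Notes on version B (the rewrite author's own statement) =====
-- stated objective: simpler
-- what changed: Replaces the stateful walk (four sequential directional loops mutating value/x/y plus a gm==1 special case) with a single dict comprehension whose coordinates are computed by a closed-form piecewise formula of the cell index, with no running state and no special case.
import Mathlib
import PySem

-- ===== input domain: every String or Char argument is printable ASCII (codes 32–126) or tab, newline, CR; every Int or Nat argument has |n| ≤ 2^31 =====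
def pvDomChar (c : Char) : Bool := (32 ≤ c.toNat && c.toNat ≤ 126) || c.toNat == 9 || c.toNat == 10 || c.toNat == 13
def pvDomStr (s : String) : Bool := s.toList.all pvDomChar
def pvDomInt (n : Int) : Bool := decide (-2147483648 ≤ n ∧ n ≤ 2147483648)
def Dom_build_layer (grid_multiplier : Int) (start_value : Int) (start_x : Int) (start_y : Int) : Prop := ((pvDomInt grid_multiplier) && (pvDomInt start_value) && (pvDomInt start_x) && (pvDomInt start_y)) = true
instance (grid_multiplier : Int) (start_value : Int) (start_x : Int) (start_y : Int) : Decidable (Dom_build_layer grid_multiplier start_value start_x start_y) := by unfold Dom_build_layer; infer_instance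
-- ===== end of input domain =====

-- B replaces A's stateful four-directional walk by a closed-form coordinate formula per
-- cell index inside one dict comprehension (objective: simpler; same O(gm) cost).

-- ===== PORT A =====
-- A builds {start: (x,y)}, returns early on gm == 1, then walks up/left/down/right
-- mutating (value, x, y) and inserting each visited cell.
def build_layer (grid_multiplier : Int) (start_value : Int) (start_x : Int) (start_y : Int) : List (Int × Int × Int) :=
  let layer : PySem.Dict Int (Int × Int) := PySem.Dict.empty.insert start_value (start_x, start_y)
  if grid_multiplier == 1 then layer.items
  else
    -- up
    let s1 := (PySem.List.pyRange 0 (grid_multiplier - 2) 1).foldl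
      (fun (s : PySem.Dict Int (Int × Int) × Int × Int × Int) (_ : Int) =>
        (s.1.insert (s.2.1 + 1) (s.2.2.1, s.2.2.2 - 1), s.2.1 + 1, s.2.2.1, s.2.2.2 - 1))
      (layer, start_value, start_x, start_y)
    -- left
    let s2 := (PySem.List.pyRange 0 (grid_multiplier - 1) 1).foldl
      (fun (s : PySem.Dict Int (Int × Int) × Int × Int × Int) (_ : Int) =>
        (s.1.insert (s.2.1 + 1) (s.2.2.1 - 1, s.2.2.2), s.2.1 + 1, s.2.2.1 - 1, s.2.2.2)) s1
    -- down
    let s3 := (PySem.List.pyRange 0 (grid_multiplier - 1) 1).foldl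
      (fun (s : PySem.Dict Int (Int × Int) × Int × Int × Int) (_ : Int) =>
        (s.1.insert (s.2.1 + 1) (s.2.2.1, s.2.2.2 + 1), s.2.1 + 1, s.2.2.1, s.2.2.2 + 1)) s2
    -- right
    let s4 := (PySem.List.pyRange 0 (grid_multiplier - 1) 1).foldl
      (fun (s : PySem.Dict Int (Int × Int) × Int × Int × Int) (_ : Int) =>
        (s.1.insert (s.2.1 + 1) (s.2.2.1 + 1, s.2.2.2), s.2.1 + 1, s.2.2.1 + 1, s.2.2.2)) s3
    s4.1.items

-- ===== PORT B =====
-- Source B's nested `pos(i)`: the closed-form coordinate of the i-th cell of the layer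
-- (u = length of the up segment, m = length of each of the other three segments).
def pvPosB (u m sx sy i : Int) : Int × Int :=
  if i ≤ u then (sx, sy - i)
  else if i ≤ u + m then (sx - (i - u), sy - u)
  else if i ≤ u + 2 * m then (sx - m, sy - u + (i - u - m))
  else (sx - m + (i - u - 2 * m), sy - u + m)

def build_layer_alt (grid_multiplier : Int) (start_value : Int) (start_x : Int) (start_y : Int) : List (Int × Int × Int) :=
  ((PySem.List.pyRange 0 (max (grid_multiplier - 2) 0 + 3 * max (grid_multiplier - 1) 0 + 1) 1).foldl
    (fun (d : PySem.Dict Int (Int × Int)) (i : Int) =>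
      d.insert (start_value + i)
        (pvPosB (max (grid_multiplier - 2) 0) (max (grid_multiplier - 1) 0) start_x start_y i))
    PySem.Dict.empty).items

-- ===== PRECONDITION & SPEC =====
def Spec_build_layer (grid_multiplier : Int) (start_value : Int) (start_x : Int) (start_y : Int) (out : List (Int × Int × Int)) : Prop := out = build_layer_alt grid_multiplier start_value start_x start_y
instance (grid_multiplier : Int) (start_value : Int) (start_x : Int) (start_y : Int) (out : List (Int × Int × Int)) : Decidable (Spec_build_layer grid_multiplier start_value start_x start_y out) := by unfold Spec_build_layer; infer_instance

-- ===== CLAIM (what is proved, stated in full; the proofs are below) =====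
def Claim_equal_build_layer : Prop := ∀ (grid_multiplier : Int) (start_value : Int) (start_x : Int) (start_y : Int), Dom_build_layer grid_multiplier start_value start_x start_y → Spec_build_layer grid_multiplier start_value start_x start_y (build_layer grid_multiplier start_value start_x start_y)

-- ===== LEMMAS AND PROOFS =====

-- The items contributed by one directional loop of A: n fresh cells starting after (v, x, y).
def segItems (v x y dx dy : Int) : Nat → List (Int × Int × Int)
  | 0 => []
  | n + 1 => (v + 1, x + dx, y + dy) :: segItems (v + 1) (x + dx) (y + dy) dx dy n

lemma segItems_zero (v x y dx dy : Int) : segItems v x y dx dy 0 = [] := rfl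

lemma segItems_succ (v x y dx dy : Int) (n : Nat) :
    segItems v x y dx dy (n + 1)
      = (v + 1, x + dx, y + dy) :: segItems (v + 1) (x + dx) (y + dy) dx dy n := rfl

lemma length_segItems (v x y dx dy : Int) (n : Nat) :
    (segItems v x y dx dy n).length = n := by
  induction n generalizing v x y with
  | zero => rfl
  | succ n ih => simp [segItems_succ, ih]

lemma getElem_segItems (v x y dx dy : Int) (n i : Nat)
    (h : i < (segItems v x y dx dy n).length) :
    (segItems v x y dx dy n)[i]
      = (v + (i : Int) + 1, x + ((i : Int) + 1) * dx, y + ((i : Int) + 1) * dy) := by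
  induction n generalizing v x y i with
  | zero => exact absurd h (by simp [segItems_zero])
  | succ n ih =>
    rcases i with _ | j
    · simp only [segItems_succ, List.getElem_cons_zero, Prod.mk.injEq]
      refine ⟨by push_cast; ring, by push_cast; ring, by push_cast; ring⟩
    · have h' : j < (segItems (v + 1) (x + dx) (y + dy) dx dy n).length := by
        rw [length_segItems]
        rw [segItems_succ, List.length_cons, length_segItems] at h
        omega
      simp only [segItems_succ, List.getElem_cons_succ]
      rw [ih _ _ _ _ h']
      simp only [Prod.mk.injEq]
      refine ⟨by push_cast; ring, by push_cast; ring, by push_cast; ring⟩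

lemma fst_segItems_le (v x y dx dy : Int) (n : Nat) :
    ∀ p ∈ segItems v x y dx dy n, p.1 ≤ v + n := by
  induction n generalizing v x y with
  | zero => simp [segItems_zero]
  | succ n ih =>
    intro p hp
    rw [segItems_succ] at hp
    rcases List.mem_cons.1 hp with rfl | hp'
    · push_cast; omega
    · have := ih (v + 1) (x + dx) (y + dy) p hp'
      push_cast at *
      omega

-- one directional loop of A, in closed form
lemma loopA (dx dy : Int) (l : List Int) (d : PySem.Dict Int (Int × Int)) (v x y : Int)
    (hd : ∀ k ∈ d.keys, k ≤ v) :
    l.foldl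
      (fun (s : PySem.Dict Int (Int × Int) × Int × Int × Int) (_ : Int) =>
        (s.1.insert (s.2.1 + 1) (s.2.2.1 + dx, s.2.2.2 + dy), s.2.1 + 1, s.2.2.1 + dx, s.2.2.2 + dy))
      (d, v, x, y)
    = (PySem.Dict.mk (d.items ++ segItems v x y dx dy l.length),
        v + l.length, x + l.length * dx, y + l.length * dy) := by
  induction l generalizing d v x y with
  | nil => simp [segItems_zero]
  | cons a t ih =>
    have hfresh : d.contains (v + 1) = false := by
      cases hc : d.contains (v + 1) with
      | false => rfl
      | true =>
        exact absurd (hd _ ((PySem.Dict.contains_iff_mem_keys d _).1 hc)) (by omega)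
    have hd' : ∀ k ∈ (d.insert (v + 1) (x + dx, y + dy)).keys, k ≤ v + 1 := by
      intro k hk
      rcases (PySem.Dict.mem_keys_insert _ _ _ _).1 hk with h | h
      · omega
      · have := hd _ h; omega
    simp only [List.foldl_cons]
    rw [ih _ _ _ _ hd']
    rw [PySem.Dict.items_insert_of_not_contains _ _ hfresh]
    simp only [List.length_cons, Prod.mk.injEq]
    refine ⟨?_, by push_cast; ring, by push_cast; ring, by push_cast; ring⟩
    congr 1
    rw [segItems_succ]
    simp [List.append_assoc]

-- the key bound propagates through a segment
lemma keys_seg_le (d : PySem.Dict Int (Int × Int)) (v x y dx dy : Int) (n : Nat)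
    (hd : ∀ k ∈ d.keys, k ≤ v) :
    ∀ k ∈ (PySem.Dict.mk (d.items ++ segItems v x y dx dy n) : PySem.Dict Int (Int × Int)).keys,
      k ≤ v + n := by
  intro k hk
  rw [PySem.Dict.keys_mk, List.map_append] at hk
  rcases List.mem_append.1 hk with hk | hk
  · have hkeys : d.keys = List.map (fun p => p.1) d.items := PySem.Dict.keys_mk d.items
    have := hd k (by rw [hkeys]; exact hk)
    have hn : (0 : Int) ≤ (n : Int) := Int.natCast_nonneg n
    omega
  · obtain ⟨p, hp, rfl⟩ := List.mem_map.1 hk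
    exact fst_segItems_le v x y dx dy n p hp

-- A's full item list, with the raw coordinate forms produced by chaining loopA
def pvSpiral (sv sx sy : Int) (u m : Nat) : List (Int × Int × Int) :=
  [(sv, (sx, sy))] ++ segItems sv sx sy 0 (-1) u
    ++ segItems (sv + u) (sx + (u : Int) * 0) (sy + (u : Int) * (-1)) (-1) 0 m
    ++ segItems (sv + u + m) (sx + (u : Int) * 0 + (m : Int) * (-1)) (sy + (u : Int) * (-1) + (m : Int) * 0) 0 1 m
    ++ segItems (sv + u + m + m) (sx + (u : Int) * 0 + (m : Int) * (-1) + (m : Int) * 0)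
        (sy + (u : Int) * (-1) + (m : Int) * 0 + (m : Int) * 1) 1 0 m

lemma A_eq (gm sv sx sy : Int) (h : gm ≠ 1) :
    build_layer gm sv sx sy = pvSpiral sv sx sy (gm - 2).toNat (gm - 1).toNat := by
  have hlayer : (PySem.Dict.empty.insert sv (sx, sy) : PySem.Dict Int (Int × Int))
      = PySem.Dict.mk [(sv, (sx, sy))] := by
    apply PySem.Dict.ext
    rw [PySem.Dict.items_insert_of_not_contains _ _ (PySem.Dict.contains_empty _)]
    rfl
  have hd0 : ∀ k ∈ (PySem.Dict.mk [(sv, (sx, sy))] : PySem.Dict Int (Int × Int)).keys, k ≤ sv := by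
    intro k hk
    simp [PySem.Dict.keys_mk] at hk
    omega
  have hf1 : (fun (s : PySem.Dict Int (Int × Int) × Int × Int × Int) (_ : Int) =>
        (s.1.insert (s.2.1 + 1) (s.2.2.1, s.2.2.2 - 1), s.2.1 + 1, s.2.2.1, s.2.2.2 - 1))
      = (fun (s : PySem.Dict Int (Int × Int) × Int × Int × Int) (_ : Int) =>
        (s.1.insert (s.2.1 + 1) (s.2.2.1 + 0, s.2.2.2 + (-1)), s.2.1 + 1, s.2.2.1 + 0, s.2.2.2 + (-1))) := by
    funext s e; simp [sub_eq_add_neg]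
  have hf2 : (fun (s : PySem.Dict Int (Int × Int) × Int × Int × Int) (_ : Int) =>
        (s.1.insert (s.2.1 + 1) (s.2.2.1 - 1, s.2.2.2), s.2.1 + 1, s.2.2.1 - 1, s.2.2.2))
      = (fun (s : PySem.Dict Int (Int × Int) × Int × Int × Int) (_ : Int) =>
        (s.1.insert (s.2.1 + 1) (s.2.2.1 + (-1), s.2.2.2 + 0), s.2.1 + 1, s.2.2.1 + (-1), s.2.2.2 + 0)) := by
    funext s e; simp [sub_eq_add_neg]
  have hf3 : (fun (s : PySem.Dict Int (Int × Int) × Int × Int × Int) (_ : Int) =>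
        (s.1.insert (s.2.1 + 1) (s.2.2.1, s.2.2.2 + 1), s.2.1 + 1, s.2.2.1, s.2.2.2 + 1))
      = (fun (s : PySem.Dict Int (Int × Int) × Int × Int × Int) (_ : Int) =>
        (s.1.insert (s.2.1 + 1) (s.2.2.1 + 0, s.2.2.2 + 1), s.2.1 + 1, s.2.2.1 + 0, s.2.2.2 + 1)) := by
    funext s e; simp
  have hf4 : (fun (s : PySem.Dict Int (Int × Int) × Int × Int × Int) (_ : Int) =>
        (s.1.insert (s.2.1 + 1) (s.2.2.1 + 1, s.2.2.2), s.2.1 + 1, s.2.2.1 + 1, s.2.2.2))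
      = (fun (s : PySem.Dict Int (Int × Int) × Int × Int × Int) (_ : Int) =>
        (s.1.insert (s.2.1 + 1) (s.2.2.1 + 1, s.2.2.2 + 0), s.2.1 + 1, s.2.2.1 + 1, s.2.2.2 + 0)) := by
    funext s e; simp
  simp only [build_layer, beq_iff_eq, if_neg h, hlayer]
  rw [hf1, hf2, hf3, hf4]
  rw [loopA 0 (-1) _ _ _ _ _ hd0]
  simp only [PySem.List.length_pyRange_one, sub_zero]
  rw [loopA (-1) 0 _ _ _ _ _ (keys_seg_le _ _ _ _ _ _ _ hd0)]
  simp only [PySem.List.length_pyRange_one, sub_zero]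
  rw [loopA 0 1 _ _ _ _ _ (keys_seg_le _ _ _ _ _ _ _ (keys_seg_le _ _ _ _ _ _ _ hd0))]
  simp only [PySem.List.length_pyRange_one, sub_zero]
  rw [loopA 1 0 _ _ _ _ _
    (keys_seg_le _ _ _ _ _ _ _ (keys_seg_le _ _ _ _ _ _ _ (keys_seg_le _ _ _ _ _ _ _ hd0)))]
  simp only [PySem.List.length_pyRange_one, sub_zero]
  simp [pvSpiral, List.append_assoc]

lemma B_eq (gm sv sx sy : Int) :
    build_layer_alt gm sv sx sy
      = (List.range ((gm - 2).toNat + 3 * (gm - 1).toNat + 1)).map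
          (fun (k : Nat) => (sv + (k : Int),
            pvPosB (((gm - 2).toNat : Nat) : Int) (((gm - 1).toNat : Nat) : Int) sx sy (k : Int))) := by
  unfold build_layer_alt
  have h2 : max (gm - 2) 0 = (((gm - 2).toNat : Nat) : Int) := by omega
  have h3 : max (gm - 1) 0 = (((gm - 1).toNat : Nat) : Int) := by omega
  rw [h2, h3]
  rw [PySem.Dict.items_foldl_insert_fresh _ (fun i => sv + i) _ _
    (fun a _ => PySem.Dict.contains_empty _)
    ((PySem.List.nodup_pyRange_one _ _).map (add_right_injective sv))]
  rw [PySem.List.pyRange_one, List.map_map]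
  have hN : ((((gm - 2).toNat : Nat) : Int) + 3 * (((gm - 1).toNat : Nat) : Int) + 1 - 0).toNat
      = (gm - 2).toNat + 3 * (gm - 1).toNat + 1 := by omega
  rw [hN]
  rw [show (PySem.Dict.empty : PySem.Dict Int (Int × Int)).items = [] from rfl, List.nil_append]
  apply List.map_congr_left
  intro k _
  simp only [Function.comp_apply, zero_add]

lemma spiral_eq (sv sx sy : Int) (u m : Nat) :
    pvSpiral sv sx sy u m
      = (List.range (u + 3 * m + 1)).map
          (fun (k : Nat) => (sv + (k : Int), pvPosB (u : Int) (m : Int) sx sy (k : Int))) := by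
  apply List.ext_getElem
  · simp [pvSpiral, length_segItems]
    omega
  · intro i h1 h2
    simp only [pvSpiral, List.length_append, List.length_cons, List.length_nil,
      length_segItems] at h1
    simp only [List.length_map, List.length_range] at h2
    simp only [List.getElem_map, List.getElem_range]
    simp only [pvSpiral, List.cons_append, List.nil_append, List.append_assoc]
    rcases i with _ | j
    · simp [pvPosB]
    · simp only [List.getElem_cons_succ]
      simp only [List.getElem_append, length_segItems]
      split_ifs with hA hB hC <;>
        · rw [getElem_segItems]
          simp only [pvPosB, Prod.mk.injEq, mul_zero, mul_one, mul_neg_one, add_zero]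
          split_ifs <;> simp only [Prod.mk.injEq] <;> push_cast at * <;>
            (try simp only [true_and]) <;> omega

-- ===== VERDICT (by name: the statement is the Claim_ definition above) =====
theorem build_layer_spec : Claim_equal_build_layer := by
  unfold Claim_equal_build_layer
  intro gm sv sx sy _
  unfold Spec_build_layer
  by_cases h1 : gm = 1
  · subst h1
    rw [B_eq]
    rw [show build_layer 1 sv sx sy
        = (PySem.Dict.empty.insert sv (sx, sy) : PySem.Dict Int (Int × Int)).items from by
      simp [build_layer]]
    rw [PySem.Dict.items_insert_of_not_contains _ _ (PySem.Dict.contains_empty _)]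
    rw [show (PySem.Dict.empty : PySem.Dict Int (Int × Int)).items = [] from rfl, List.nil_append]
    have e1 : ((1 : Int) - 2).toNat = 0 := by omega
    have e2 : ((1 : Int) - 1).toNat = 0 := by omega
    rw [e1, e2]
    simp [pvPosB]
  · rw [A_eq gm sv sx sy h1, B_eq, spiral_eq]
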